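-- pv_equiv track=rewrite | github.com/suzyrhkr/Algorithm-PS | programmers/level1/예산.py | solution
-- ===== SOURCE A (Python) =====
-- from itertools import combinations
--
-- def solution(d, budget):
--     answer = 0
--     num = len(d)
--     total = []
--
--     while 0<num:
--         combination = combinations(d, num)
--
--         for c in combination:
--             if sum(c)==budget:
--                 return num
--             elif sum(c) < budget:
--                 total.append((num,sum(c)))
--
--         num-=1
--
--     answer = max(total, key=lambda x:x[1])[0]
--     return answer
-- ===== SOURCE B (Python) =====
-- def solution(d, budget):
--     # DP over achievable subset sums: best maps each sum reachable by a
--     # nonempty subset of d to the largest subset size achieving it.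
--     best = {}
--     for x in d:
--         new = dict(best)
--         for s, c in best.items():
--             if new.get(s + x, 0) < c + 1:
--                 new[s + x] = c + 1
--         if new.get(x, 0) < 1:
--             new[x] = 1
--         best = new
--     if budget in best:
--         return best[budget]
--     return best[max(s for s in best if s < budget)]
-- ===== Notes on version B (the rewrite author's own statement) =====
-- stated objective: alternative
-- what changed: Replaces per-size enumeration of all itertools.combinations (largest size first, collecting (size,sum) pairs and a final max) with a dict-based DP over achievable subset sums that keeps, for every reachable sum, the largest subset size achieving it, answering by one lookup at budget or at the largest stored sum below budget.
import Mathlib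
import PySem

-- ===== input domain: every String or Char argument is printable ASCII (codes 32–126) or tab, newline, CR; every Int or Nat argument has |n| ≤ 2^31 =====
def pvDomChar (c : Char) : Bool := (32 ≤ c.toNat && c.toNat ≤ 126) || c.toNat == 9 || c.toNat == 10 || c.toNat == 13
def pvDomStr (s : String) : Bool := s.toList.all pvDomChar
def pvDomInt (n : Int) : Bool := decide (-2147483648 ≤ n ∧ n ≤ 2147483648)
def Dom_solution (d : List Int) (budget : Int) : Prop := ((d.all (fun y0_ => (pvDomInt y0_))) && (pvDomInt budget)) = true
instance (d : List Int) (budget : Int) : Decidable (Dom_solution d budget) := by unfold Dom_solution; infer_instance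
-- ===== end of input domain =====

-- B replaces A's per-size enumeration of all combinations with a dict DP over achievable
-- subset sums keeping the largest subset size per sum (a different algorithm, similar worst-case cost).

-- ===== PORT A =====
-- the inner 'for c in combination' loop: none = Python's early 'return num' (a combination summed to budget),
-- some total' = the loop finished, total' is total extended with the (num, sum) pairs below budget
def scanA (budget : Int) (num : Int) : List (List Int) → List (Int × Int) → Option (List (Int × Int))
  | [], total => some total
  | c :: rest, total =>
      if c.sum = budget then none
      else if c.sum < budget then scanA budget num rest (total ++ [(num, c.sum)])
      else scanA budget num rest total

-- the 'while 0 < num' loop, num counting down; at num = 0 Python's max(total, key=lambda x: x[1])[0]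
-- (ValueError on empty total is excluded by Pre_solution; the port returns 0 there)
def loopA (d : List Int) (budget : Int) : Nat → List (Int × Int) → Int
  | 0, total => ((PySem.List.max? total (fun x => x.2)).map (·.1)).getD 0
  | n+1, total =>
      match scanA budget ((n : Int) + 1) (PySem.List.combinations d (n+1)) total with
      | none => (n : Int) + 1
      | some total' => loopA d budget n total'

def solution (d : List Int) (budget : Int) : Int := loopA d budget d.length []

-- ===== PORT B =====
-- one item x: new = dict(best); for s, c in best.items(): if new.get(s+x,0) < c+1: new[s+x] = c+1;
-- then if new.get(x,0) < 1: new[x] = 1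
def stepB (x : Int) (best : PySem.Dict Int Int) : PySem.Dict Int Int :=
  let nw := best.items.foldl
      (fun nw p => if nw.getD (p.1 + x) 0 < p.2 + 1 then nw.insert (p.1 + x) (p.2 + 1) else nw)
      best
  if nw.getD x 0 < 1 then nw.insert x 1 else nw

def solution_alt (d : List Int) (budget : Int) : Int :=
  let best := d.foldl (fun b x => stepB x b) PySem.Dict.empty
  if best.contains budget then best.getD budget 0
  else
    -- max(s for s in best if s < budget): keys are distinct, so the max is order-independent;
    -- Python's ValueError on an empty generator is excluded by Pre_solution (the port returns 0 there)
    match PySem.List.max? (best.keys.filter (fun s => decide (s < budget))) (fun s => s) with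
    | some m => best.getD m 0
    | none => 0

-- ===== PRECONDITION & SPEC =====
-- Exactly the inputs where A returns: A raises ValueError (max of empty total) iff no nonempty
-- subset of d sums to ≤ budget, iff the least nonempty-subset sum — the sum of the negative
-- elements if any exist, else the least single element — exceeds budget.
def Pre_solution (d : List Int) (budget : Int) : Prop :=
  (d.any (fun x => decide (x < 0)) = true ∧ (d.filter (fun x => decide (x < 0))).sum ≤ budget) ∨
  (d.any (fun x => decide (x < 0)) = false ∧ ∃ x ∈ d, x ≤ budget)
instance (d : List Int) (budget : Int) : Decidable (Pre_solution d budget) := by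
  unfold Pre_solution; infer_instance

def pvWitness_solution : List Int × Int := ([1, 3, 2], 4)

def Spec_solution (d : List Int) (budget : Int) (out : Int) : Prop := out = solution_alt d budget
instance (d : List Int) (budget : Int) (out : Int) : Decidable (Spec_solution d budget out) := by
  unfold Spec_solution; infer_instance

-- ===== CLAIM (what is proved, stated in full; the proofs are below) =====
def Claim_equal_solution : Prop := ∀ (d : List Int) (budget : Int), Dom_solution d budget →
  Pre_solution d budget → Spec_solution d budget (solution d budget)

-- ===== LEMMAS AND PROOFS =====

-- model l t = the largest size of a nonempty sublist of l summing to t, 0 if none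
def model (l : List Int) (t : Int) : Int :=
  ((l.sublists.filter (fun c => !c.isEmpty && c.sum == t)).map (fun c => (c.length : Int))).foldl max 0

lemma model_nonneg (l : List Int) (t : Int) : 0 ≤ model l t :=
  (PySem.List.le_foldl_max _ 0).1

lemma le_model {l c : List Int} {t : Int} (h : c.Sublist l) (hne : c ≠ []) (hs : c.sum = t) :
    (c.length : Int) ≤ model l t := by
  have hm : (c.length : Int) ∈ ((l.sublists.filter (fun c => !c.isEmpty && c.sum == t)).map (fun c => (c.length : Int))) := by
    refine List.mem_map.mpr ⟨c, List.mem_filter.mpr ⟨List.mem_sublists.mpr h, ?_⟩, rfl⟩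
    simp [hne, hs]
  exact (PySem.List.le_foldl_max _ 0).2 _ hm

lemma model_attain {l : List Int} {t : Int} (h : model l t ≠ 0) :
    ∃ c : List Int, c.Sublist l ∧ c ≠ [] ∧ c.sum = t ∧ (c.length : Int) = model l t := by
  rcases PySem.List.foldl_max_mem ((l.sublists.filter (fun c => !c.isEmpty && c.sum == t)).map (fun c => (c.length : Int))) 0 with h0 | hmem
  · exact absurd h0 h
  · rcases List.mem_map.mp hmem with ⟨c, hc, hlen⟩
    rcases List.mem_filter.mp hc with ⟨hsub, hp⟩
    simp only [Bool.and_eq_true, Bool.not_eq_true', List.isEmpty_eq_false_iff, beq_iff_eq] at hp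
    exact ⟨c, List.mem_sublists.mp hsub, hp.1, hp.2, hlen⟩

lemma one_le_model {l : List Int} {t : Int} (h : model l t ≠ 0) : 1 ≤ model l t := by
  rcases model_attain h with ⟨c, _, hne, _, hlen⟩
  have : 1 ≤ c.length := List.length_pos_iff.mpr hne
  omega

-- the DP recurrence for one more item
lemma model_concat (l : List Int) (x t : Int) :
    model (l ++ [x]) t =
      max (model l t)
        (if model l (t - x) ≠ 0 then model l (t - x) + 1 else if t = x then 1 else 0) := by
  apply le_antisymm
  · by_cases h : model (l ++ [x]) t = 0
    · have := le_max_left (model l t) (if model l (t - x) ≠ 0 then model l (t - x) + 1 else if t = x then 1 else 0)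
      have h0 : (0:Int) ≤ model l t := (PySem.List.le_foldl_max _ 0).1
      omega
    · rcases model_attain h with ⟨c, hsub, hne, hs, hlen⟩
      rw [← hlen]
      rcases List.sublist_append_iff.mp hsub with ⟨u, v, rfl, hu, hv⟩
      rcases List.sublist_singleton.mp hv with rfl | rfl
      · simp only [List.append_nil] at *
        exact le_max_of_le_left (le_model hu hne hs)
      · by_cases hu0 : u = []
        · subst hu0
          simp only [List.nil_append, List.sum_cons, List.sum_nil] at hs
        -- c = [x], so t = x
          apply le_max_of_le_right
          split_ifs with h1 h2
          · have := one_le_model h1; simp; omega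
          · simp
          · omega
        · apply le_max_of_le_right
          have husum : u.sum = t - x := by
            simp [List.sum_append] at hs; omega
          have h1 : model l (t - x) ≠ 0 := by
            have := le_model hu hu0 husum
            have : 1 ≤ (u.length : Int) := by
              have := List.length_pos_iff.mpr hu0; omega
            intro h0
            have := le_model hu hu0 husum
            omega
          rw [if_pos h1]
          have := le_model hu hu0 husum
          simp only [List.length_append, List.length_cons, List.length_nil]
          push_cast
          omega
  · apply max_le
    · by_cases h : model l t = 0
      · rw [h]; exact (PySem.List.le_foldl_max _ 0).1
      · rcases model_attain h with ⟨c, hsub, hne, hs, hlen⟩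
        rw [← hlen]
        exact le_model (hsub.trans (List.sublist_append_left l [x])) hne hs
    · split_ifs with h1 h2
      · rcases model_attain h1 with ⟨c, hsub, hne, hs, hlen⟩
        have : ((c ++ [x]).length : Int) = model l (t - x) + 1 := by
          simp [← hlen]
        rw [← this]
        exact le_model (hsub.append (List.Sublist.refl [x])) (by simp) (by simp [hs])
      · rw [h2]
        have : (([x] : List Int).length : Int) = 1 := by simp
        rw [← this]
        exact le_model (List.sublist_append_right l [x]) (by simp) (by simp)
      · exact (PySem.List.le_foldl_max _ 0).1

def exactK (d : List Int) (b : Int) : Nat → Option Nat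
  | 0 => none
  | n+1 => if (PySem.List.combinations d (n+1)).any (fun c => decide (c.sum = b)) then some (n+1)
           else exactK d b n

def blocks (d : List Int) (b : Int) : Nat → List (Int × Int)
  | 0 => []
  | n+1 => ((PySem.List.combinations d (n+1)).filter (fun c => decide (c.sum < b))).map
             (fun c => (((n : Int) + 1), c.sum)) ++ blocks d b n

lemma scanA_eq_none_iff (b num : Int) (cs : List (List Int)) (total : List (Int × Int)) :
    scanA b num cs total = none ↔ ∃ c ∈ cs, c.sum = b := by
  induction cs generalizing total with
  | nil => simp [scanA]
  | cons c rest ih =>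
    by_cases h1 : c.sum = b
    · simp [scanA, h1]
    · by_cases h2 : c.sum < b <;> simp [scanA, h1, h2, ih]
lemma scanA_eq_some (b num : Int) {cs : List (List Int)} (h : ∀ c ∈ cs, c.sum ≠ b)
    (total : List (Int × Int)) :
    scanA b num cs total =
      some (total ++ (cs.filter (fun c => decide (c.sum < b))).map (fun c => (num, c.sum))) := by
  induction cs generalizing total with
  | nil => simp [scanA]
  | cons c rest ih =>
    have h1 : c.sum ≠ b := h c (by simp)
    by_cases h2 : c.sum < b
    · simp only [scanA, if_neg h1, if_pos h2]
      rw [ih (fun c hc => h c (by simp [hc]))]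
      simp [h2]
    · simp only [scanA, if_neg h1, if_neg h2]
      rw [ih (fun c hc => h c (by simp [hc]))]
      simp [h2]
lemma loopA_eq (d : List Int) (b : Int) (n : Nat) (total : List (Int × Int)) :
    loopA d b n total =
      match exactK d b n with
      | some k => (k : Int)
      | none => ((PySem.List.max? (total ++ blocks d b n) (fun x => x.2)).map (·.1)).getD 0 := by
  induction n generalizing total with
  | zero => simp [loopA, exactK, blocks]
  | succ n ih =>
    by_cases hex : ∃ c ∈ PySem.List.combinations d (n+1), c.sum = b
    · have h1 : scanA b ((n : Int) + 1) (PySem.List.combinations d (n+1)) total = none :=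
        (scanA_eq_none_iff _ _ _ _).mpr hex
      have h2 : (PySem.List.combinations d (n+1)).any (fun c => decide (c.sum = b)) = true := by
        rcases hex with ⟨c, hc, hs⟩
        exact List.any_eq_true.mpr ⟨c, hc, by simp [hs]⟩
      simp [loopA, h1, exactK, h2]
    · push Not at hex
      have h1 := scanA_eq_some b ((n : Int) + 1) hex total
      have h2 : (PySem.List.combinations d (n+1)).any (fun c => decide (c.sum = b)) = false := by
        simp only [List.any_eq_false]
        intro c hc
        simp [hex c hc]
      simp only [loopA, h1, exactK, h2, Bool.false_eq_true, if_false]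
      rw [ih]
      simp [blocks, List.append_assoc]
lemma exactK_some {d : List Int} {b : Int} {n k : Nat} (h : exactK d b n = some k) :
    1 ≤ k ∧ k ≤ n ∧ (∃ c : List Int, c.Sublist d ∧ c.length = k ∧ c.sum = b) ∧
      ∀ j, k < j → j ≤ n → ¬ ∃ c : List Int, c.Sublist d ∧ c.length = j ∧ c.sum = b := by
  induction n with
  | zero => simp [exactK] at h
  | succ n ih =>
    by_cases h2 : (PySem.List.combinations d (n+1)).any (fun c => decide (c.sum = b)) = true
    · rw [exactK, if_pos h2] at h
      rcases List.any_eq_true.mp h2 with ⟨c, hc, hs⟩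
      rcases (PySem.List.mem_combinations_iff d (n+1) c).mp hc with ⟨hsub, hlen⟩
      cases h
      exact ⟨by omega, le_refl _, ⟨c, hsub, hlen, by simpa using hs⟩, fun j hj hj' => by omega⟩
    · rw [exactK, if_neg h2] at h
      obtain ⟨hk1, hkn, hw, hmax⟩ := ih h
      refine ⟨hk1, by omega, hw, ?_⟩
      intro j hj hj' hcon
      rcases Nat.lt_or_ge j (n+1) with hlt | hge
      · exact hmax j hj (by omega) hcon
      · have hjeq : j = n+1 := by omega
        subst hjeq
        rcases hcon with ⟨c, hsub, hlen, hs⟩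
        exact h2 (List.any_eq_true.mpr ⟨c, (PySem.List.mem_combinations_iff d (n+1) c).mpr ⟨hsub, hlen⟩, by simp [hs]⟩)
lemma exactK_none {d : List Int} {b : Int} {n : Nat} (h : exactK d b n = none) :
    ∀ k, 1 ≤ k → k ≤ n → ¬ ∃ c : List Int, c.Sublist d ∧ c.length = k ∧ c.sum = b := by
  induction n with
  | zero => intro k h1 h2; omega
  | succ n ih =>
    rw [exactK] at h
    by_cases h2 : (PySem.List.combinations d (n+1)).any (fun c => decide (c.sum = b)) = true
    · simp [h2] at h
    · rw [if_neg h2] at h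
      intro k hk1 hkn hcon
      rcases Nat.lt_or_ge k (n+1) with hlt | hge
      · exact ih h k hk1 (by omega) hcon
      · have : k = n+1 := by omega
        subst this
        rcases hcon with ⟨c, hsub, hlen, hs⟩
        exact h2 (List.any_eq_true.mpr ⟨c, (PySem.List.mem_combinations_iff d (n+1) c).mpr ⟨hsub, hlen⟩, by simp [hs]⟩)
lemma mem_blocks {d : List Int} {b : Int} {n : Nat} {p : Int × Int} :
    p ∈ blocks d b n ↔
      ∃ c : List Int, c.Sublist d ∧ 1 ≤ c.length ∧ c.length ≤ n ∧ c.sum < b ∧ p = ((c.length : Int), c.sum) := by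
  induction n with
  | zero =>
    simp only [blocks, List.not_mem_nil, false_iff]
    rintro ⟨c, _, h1, h2, _⟩
    omega
  | succ n ih =>
    simp only [blocks, List.mem_append, ih, List.mem_map, List.mem_filter]
    constructor
    · rintro (⟨c, ⟨hc, hs⟩, rfl⟩ | ⟨c, hsub, h1, h2, h3, rfl⟩)
      · rcases (PySem.List.mem_combinations_iff d (n+1) c).mp hc with ⟨hsub, hlen⟩
        exact ⟨c, hsub, by omega, by omega, by simpa using hs, by rw [hlen]; push_cast; ring_nf⟩
      · exact ⟨c, hsub, h1, by omega, h3, rfl⟩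
    · rintro ⟨c, hsub, h1, h2, h3, rfl⟩
      rcases Nat.lt_or_ge c.length (n+1) with hlt | hge
      · exact Or.inr ⟨c, hsub, h1, by omega, h3, rfl⟩
      · have hlen : c.length = n+1 := by omega
        exact Or.inl ⟨c, ⟨(PySem.List.mem_combinations_iff d (n+1) c).mpr ⟨hsub, hlen⟩, by simpa using h3⟩, by rw [hlen]; push_cast; ring_nf⟩

lemma max?_cons {α κ : Type} [LinearOrder κ] (key : α → κ) (x : α) (t : List α) :
    PySem.List.max? (x :: t) key = some (match PySem.List.max? t key with
      | none => x
      | some mt => if key x < key mt then mt else x) := by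
  have unfold1 : ∀ (z : α) (s : List α), PySem.List.max? (z :: s) key
      = s.foldl (fun acc w => match acc with
          | none => some w
          | some mm => if key mm < key w then some w else some mm) (some z) := fun z s => rfl
  induction t generalizing x with
  | nil => simp [PySem.List.max?]
  | cons y tt ih =>
    rw [unfold1, List.foldl_cons]
    by_cases h : key x < key y
    · simp only [if_pos h]
      rw [← unfold1, ih]
      cases hmt : PySem.List.max? tt key with
      | none => simp [h]
      | some mt =>
        by_cases h2 : key y < key mt
        · have h3 : key x < key mt := lt_trans h h2
          simp [h2, h3]
        · simp [h2, h]
    · simp only [if_neg h]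
      rw [← unfold1, ih x, ih y]
      cases hmt : PySem.List.max? tt key with
      | none => simp [h]
      | some mt =>
        by_cases h2 : key y < key mt
        · simp [h2]
        · have h3 : ¬ key x < key mt := fun hc => h (lt_of_lt_of_le hc (not_lt.mp h2))
          simp [h2, h3, h]
lemma max?_append {α κ : Type} [LinearOrder κ] (key : α → κ) (u v : List α) :
    PySem.List.max? (u ++ v) key = match PySem.List.max? u key with
      | none => PySem.List.max? v key
      | some a => some (match PySem.List.max? v key with
          | none => a
          | some bb => if key a < key bb then bb else a) := by
  have unfold0 : ∀ (s : List α), PySem.List.max? s key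
      = s.foldl (fun acc w => match acc with
          | none => some w
          | some mm => if key mm < key w then some w else some mm) none := fun s => rfl
  have unfold1 : ∀ (z : α) (s : List α), PySem.List.max? (z :: s) key
      = s.foldl (fun acc w => match acc with
          | none => some w
          | some mm => if key mm < key w then some w else some mm) (some z) := fun z s => rfl
  cases hu : PySem.List.max? u key with
  | none =>
    rw [PySem.List.max?_eq_none_iff] at hu
    subst hu; simp
  | some a =>
    rw [unfold0 (u ++ v), List.foldl_append, ← unfold0 u, hu, ← unfold1, max?_cons]

lemma blocks_fst_le {d : List Int} {b : Int} {n : Nat} {q : Int × Int} (hq : q ∈ blocks d b n) :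
    q.1 ≤ (n : Int) := by
  rcases mem_blocks.mp hq with ⟨c, _, _, h2, _, rfl⟩
  simpa using Int.ofNat_le.mpr h2

lemma max?_blocks_ties {d : List Int} {b : Int} {n : Nat} {p : Int × Int}
    (h : PySem.List.max? (blocks d b n) (fun x => x.2) = some p) :
    ∀ q ∈ blocks d b n, q.2 = p.2 → q.1 ≤ p.1 := by
  induction n with
  | zero => simp [blocks, PySem.List.max?] at h
  | succ n ih =>
    simp only [blocks] at h ⊢
    rw [max?_append] at h
    have hblkfst : ∀ q ∈ ((PySem.List.combinations d (n+1)).filter (fun c => decide (c.sum < b))).map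
        (fun c => (((n : Int) + 1), c.sum)), q.1 = (n : Int) + 1 := by
      intro q hq
      rcases List.mem_map.mp hq with ⟨c, _, rfl⟩
      rfl
    cases hu : PySem.List.max? (((PySem.List.combinations d (n+1)).filter (fun c => decide (c.sum < b))).map
        (fun c => (((n : Int) + 1), c.sum))) (fun x => x.2) with
    | none =>
      simp only [hu] at h
      have hblknil := (PySem.List.max?_eq_none_iff _ _).mp hu
      intro q hq hq2
      rcases List.mem_append.mp hq with hq | hq
      · rw [hblknil] at hq; simp at hq
      · exact ih h q hq hq2
    | some a =>
      simp only [hu] at h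
      cases hv : PySem.List.max? (blocks d b n) (fun x => x.2) with
      | none =>
        simp only [hv] at h
        have hpa : p = a := by simpa using h.symm
        have hrestnil := (PySem.List.max?_eq_none_iff _ _).mp hv
        intro q hq hq2
        rcases List.mem_append.mp hq with hq | hq
        · rw [hblkfst q hq, hpa, hblkfst a (PySem.List.max?_mem hu)]
        · rw [hrestnil] at hq; simp at hq
      | some bb =>
        simp only [hv] at h
        by_cases hlt : a.2 < bb.2
        · have hp : p = bb := by rw [if_pos hlt] at h; exact (Option.some_inj.mp h).symm
          intro q hq hq2
          rcases List.mem_append.mp hq with hq | hq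
          · exfalso
            have hqa := PySem.List.max?_isMax hu q hq
            simp only at hqa
            rw [hp] at hq2
            omega
          · exact ih (by rw [hv, hp]) q hq hq2
        · have hp : p = a := by rw [if_neg hlt] at h; exact (Option.some_inj.mp h).symm
          intro q hq hq2
          rcases List.mem_append.mp hq with hq | hq
          · rw [hblkfst q hq, hp, hblkfst a (PySem.List.max?_mem hu)]
          · have hle := blocks_fst_le hq
            rw [hp, hblkfst a (PySem.List.max?_mem hu)]
            omega

lemma innerFold_nodup (x : Int) (L : List (Int × Int)) :
    ∀ (acc : PySem.Dict Int Int), acc.keys.Nodup →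
      (L.foldl (fun nw p => if nw.getD (p.1 + x) 0 < p.2 + 1 then nw.insert (p.1 + x) (p.2 + 1) else nw) acc).keys.Nodup := by
  induction L with
  | nil => intro acc h; exact h
  | cons p rest ih =>
    intro acc h
    simp only [List.foldl_cons]
    apply ih
    by_cases hc : acc.getD (p.1 + x) 0 < p.2 + 1
    · rw [if_pos hc]; exact PySem.Dict.nodup_keys_insert _ _ _ h
    · rw [if_neg hc]; exact h

lemma innerFold_get? (x t : Int) :
    ∀ (L : List (Int × Int)), (L.map Prod.fst).Nodup → ∀ (acc : PySem.Dict Int Int),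
      (L.foldl (fun nw p => if nw.getD (p.1 + x) 0 < p.2 + 1 then nw.insert (p.1 + x) (p.2 + 1) else nw) acc).get? t =
        match L.find? (fun p => p.1 == t - x) with
        | some p => if acc.getD t 0 < p.2 + 1 then some (p.2 + 1) else acc.get? t
        | none => acc.get? t := by
  intro L
  induction L with
  | nil => intro _ acc; simp
  | cons p rest ih =>
    intro hnd acc
    simp only [List.map_cons, List.nodup_cons] at hnd
    obtain ⟨hp_notin, hnd'⟩ := hnd
    simp only [List.foldl_cons]
    rw [ih hnd']
    by_cases hp : p.1 = t - x
    · have ht : t = p.1 + x := by omega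
      have hfind : (p :: rest).find? (fun q => q.1 == t - x) = some p := by
        simp [hp]
      have hrest : rest.find? (fun q => q.1 == t - x) = none := by
        rw [List.find?_eq_none]
        intro q hq
        simp only [beq_iff_eq]
        intro h1
        exact hp_notin (List.mem_map.mpr ⟨q, hq, by omega⟩)
      rw [hfind, hrest]
      by_cases hc : acc.getD (p.1 + x) 0 < p.2 + 1
      · simp only [if_pos hc, ht]
        rw [PySem.Dict.get?_insert_self]
      · simp only [if_neg hc, ht]
    · have htne : t ≠ p.1 + x := by omega
      have hfind : (p :: rest).find? (fun q => q.1 == t - x) = rest.find? (fun q => q.1 == t - x) := by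
        simp [hp]
      rw [hfind]
      have hget : ∀ (b : PySem.Dict Int Int),
          (if b.getD (p.1 + x) 0 < p.2 + 1 then b.insert (p.1 + x) (p.2 + 1) else b).get? t = b.get? t := by
        intro b
        by_cases hc : b.getD (p.1 + x) 0 < p.2 + 1
        · rw [if_pos hc, PySem.Dict.get?_insert, if_neg htne]
        · rw [if_neg hc]
      have hgetD : ∀ (b : PySem.Dict Int Int),
          (if b.getD (p.1 + x) 0 < p.2 + 1 then b.insert (p.1 + x) (p.2 + 1) else b).getD t 0 = b.getD t 0 := by
        intro b
        by_cases hc : b.getD (p.1 + x) 0 < p.2 + 1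
        · rw [if_pos hc, PySem.Dict.getD_eq_get?_getD, PySem.Dict.get?_insert, if_neg htne,
            ← PySem.Dict.getD_eq_get?_getD]
        · rw [if_neg hc]
      cases hf : rest.find? (fun q => q.1 == t - x) with
      | none => simp only [hget]
      | some q => simp only [hget, hgetD]

def DInv (l : List Int) (best : PySem.Dict Int Int) : Prop :=
  best.keys.Nodup ∧ ∀ t, best.get? t = if model l t = 0 then none else some (model l t)

lemma DInv_step {l : List Int} {best : PySem.Dict Int Int} (x : Int) (h : DInv l best) :
    DInv (l ++ [x]) (stepB x best) := by
  obtain ⟨hnd, hget⟩ := h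
  have hgetD : ∀ t, best.getD t 0 = model l t := by
    intro t
    rw [PySem.Dict.getD_eq_get?_getD, hget]
    by_cases h0 : model l t = 0
    · rw [if_pos h0, h0]; rfl
    · rw [if_neg h0]; rfl
  have hndmapfst : (best.items.map Prod.fst).Nodup := hnd
  -- find? on items from get?
  have hfind : ∀ t, best.items.find? (fun q => q.1 == t - x) =
      match best.get? (t - x) with
      | none => none
      | some v => some (t - x, v) := by
    intro t
    cases hf : best.items.find? (fun q => q.1 == t - x) with
    | none =>
      have : best.get? (t - x) = none := by
        show (best.items.find? (fun q => q.1 == t - x)).map Prod.snd = none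
        rw [hf]; rfl
      rw [this]
    | some q =>
      have hq1 : q.1 = t - x := by
        have := List.find?_some hf
        simpa using this
      have : best.get? (t - x) = some q.2 := by
        show (best.items.find? (fun q => q.1 == t - x)).map Prod.snd = some q.2
        rw [hf]; rfl
      rw [this, ← hq1]
  -- the inner loop's dict, pointwise
  have hnw : ∀ t,
      (best.items.foldl (fun nw p => if nw.getD (p.1 + x) 0 < p.2 + 1 then nw.insert (p.1 + x) (p.2 + 1) else nw) best).get? t =
        if model l (t - x) ≠ 0 ∧ model l t < model l (t - x) + 1
        then some (model l (t - x) + 1)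
        else best.get? t := by
    intro t
    rw [innerFold_get? x t best.items hndmapfst best, hfind t]
    by_cases hb : model l (t - x) = 0
    · have : best.get? (t - x) = none := by rw [hget, if_pos hb]
      rw [this]
      simp [hb]
    · have : best.get? (t - x) = some (model l (t - x)) := by rw [hget, if_neg hb]
      rw [this]
      simp only [hgetD]
      by_cases hlt : model l t < model l (t - x) + 1
      · rw [if_pos hlt, if_pos ⟨hb, hlt⟩]
      · rw [if_neg hlt, if_neg (by tauto)]
  have hnwnd := innerFold_nodup x best.items best hnd
  constructor
  · show (stepB x best).keys.Nodup
    unfold stepB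
    by_cases hg : (best.items.foldl (fun nw p => if nw.getD (p.1 + x) 0 < p.2 + 1 then nw.insert (p.1 + x) (p.2 + 1) else nw) best).getD x 0 < 1
    · simp only [hg, if_pos]
      exact PySem.Dict.nodup_keys_insert _ _ _ hnwnd
    · simp only [hg, if_false]
      exact hnwnd
  · intro t
    have hM := model_concat l x t
    have h0t : 0 ≤ model l t := model_nonneg l t
    have h0b : 0 ≤ model l (t - x) := model_nonneg l (t - x)
    have h0x : 0 ≤ model l x := model_nonneg l x
    have h00 : 0 ≤ model l 0 := model_nonneg l 0
    have hnwD : ∀ s,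
        (best.items.foldl (fun nw p => if nw.getD (p.1 + x) 0 < p.2 + 1 then nw.insert (p.1 + x) (p.2 + 1) else nw) best).getD s 0 =
          if model l (s - x) ≠ 0 ∧ model l s < model l (s - x) + 1
          then model l (s - x) + 1
          else model l s := by
      intro s
      rw [PySem.Dict.getD_eq_get?_getD, hnw s]
      by_cases hc : model l (s - x) ≠ 0 ∧ model l s < model l (s - x) + 1
      · rw [if_pos hc, if_pos hc]; rfl
      · rw [if_neg hc, if_neg hc, hget]
        by_cases h0 : model l s = 0
        · rw [if_pos h0, h0]; rfl
        · rw [if_neg h0]; rfl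
    show (stepB x best).get? t = _
    unfold stepB
    simp only []
    by_cases hg : (best.items.foldl (fun nw p => if nw.getD (p.1 + x) 0 < p.2 + 1 then nw.insert (p.1 + x) (p.2 + 1) else nw) best).getD x 0 < 1
    · rw [if_pos hg]
      rw [hnwD x] at hg
      have hxx : x - x = (0 : Int) := by ring
      rw [hxx] at hg
      have hg' : model l 0 = 0 ∧ model l x = 0 := by
        by_cases hb : model l 0 ≠ 0 ∧ model l x < model l 0 + 1
        · rw [if_pos hb] at hg; omega
        · rw [if_neg hb] at hg
          have hx0 : model l x = 0 := by omega
          refine ⟨?_, hx0⟩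
          by_contra hne
          have h1 := one_le_model hne
          exact hb ⟨hne, by omega⟩
      rw [PySem.Dict.get?_insert]
      by_cases ht : t = x
      · rw [if_pos ht]
        have hMx : model (l ++ [x]) t = 1 := by
          rw [ht, model_concat l x x, hxx, hg'.1, hg'.2]
          norm_num
        rw [hMx]
        norm_num
      · rw [if_neg ht]
        rw [hnw t]
        by_cases hc : model l (t - x) ≠ 0 ∧ model l t < model l (t - x) + 1
        · rw [if_pos hc]
          have : model (l ++ [x]) t = model l (t - x) + 1 := by
            rw [hM, if_pos hc.1]
            omega
          rw [this, if_neg (by omega)]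
        · rw [if_neg hc, hget]
          have : model (l ++ [x]) t = model l t := by
            rw [hM]
            by_cases hb : model l (t - x) ≠ 0
            · rw [if_pos hb]; omega
            · rw [if_neg hb, if_neg ht]; omega
          rw [this]
    · rw [if_neg hg]
      rw [hnwD x] at hg
      rw [hnw t]
      by_cases hc : model l (t - x) ≠ 0 ∧ model l t < model l (t - x) + 1
      · rw [if_pos hc]
        have : model (l ++ [x]) t = model l (t - x) + 1 := by
          rw [hM, if_pos hc.1]; omega
        rw [this, if_neg (by omega)]
      · rw [if_neg hc, hget]
        have : model (l ++ [x]) t = model l t := by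
          rw [hM]
          by_cases hb : model l (t - x) ≠ 0
          · rw [if_pos hb]; omega
          · rw [if_neg hb]
            by_cases ht : t = x
            · rw [if_pos ht]
              have hb0 : model l (t - x) = 0 := not_not.mp hb
              have hxx0 : model l (x - x) = model l (t - x) := by rw [ht]
              rw [hxx0, hb0] at hg
              simp only [ne_eq] at hg
              simp at hg
              rw [ht]
              omega
            · rw [if_neg ht]; omega
        rw [this]

lemma DInv_foldl (d : List Int) : DInv d (d.foldl (fun b x => stepB x b) PySem.Dict.empty) := by
  induction d using List.reverseRecOn with
  | nil =>
    constructor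
    · simp [PySem.Dict.keys_empty]
    · intro t
      have : model [] t = 0 := rfl
      rw [this, if_pos rfl]
      exact PySem.Dict.get?_empty t
  | append_singleton l x ih =>
    rw [List.foldl_append]
    exact DInv_step x ih

lemma Pre_exists {d : List Int} {b : Int} (h : Pre_solution d b) :
    ∃ c : List Int, c.Sublist d ∧ c ≠ [] ∧ c.sum ≤ b := by
  rcases h with ⟨hany, hsum⟩ | ⟨_, x, hx, hxb⟩
  · rcases List.any_eq_true.mp hany with ⟨x, hx, hneg⟩
    refine ⟨d.filter (fun y => decide (y < 0)), List.filter_sublist, ?_, hsum⟩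
    exact List.ne_nil_of_mem (List.mem_filter.mpr ⟨hx, hneg⟩)
  · exact ⟨[x], List.singleton_sublist.mpr hx, by simp, by simpa using hxb⟩

theorem solution_eq (d : List Int) (budget : Int) (hpre : Pre_solution d budget) :
    solution d budget = solution_alt d budget := by
  obtain ⟨hnd, hget⟩ := DInv_foldl d
  set best := d.foldl (fun b x => stepB x b) PySem.Dict.empty with hbest
  have hgetD : ∀ t, best.getD t 0 = model d t := by
    intro t
    rw [PySem.Dict.getD_eq_get?_getD, hget]
    by_cases h0 : model d t = 0
    · rw [if_pos h0, h0]; rfl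
    · rw [if_neg h0]; rfl
  have hkeys : ∀ s, s ∈ best.keys ↔ model d s ≠ 0 := by
    intro s
    constructor
    · intro hs h0
      exact ((PySem.Dict.get?_eq_none_iff_not_mem_keys best s).mp (by rw [hget, if_pos h0])) hs
    · intro h0
      by_contra hs
      have hnone := (PySem.Dict.get?_eq_none_iff_not_mem_keys best s).mpr hs
      rw [hget, if_neg h0] at hnone
      simp at hnone
  show loopA d budget d.length [] = solution_alt d budget
  rw [loopA_eq]
  unfold solution_alt
  rw [← hbest]
  cases hk : exactK d budget d.length with
  | some k =>
    simp only []
    obtain ⟨hk1, hkn, ⟨c, hcsub, hclen, hcsum⟩, hmax⟩ := exactK_some hk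
    have hcne : c ≠ [] := by
      intro h; rw [h] at hclen; simp at hclen; omega
    have hKle : (k : Int) ≤ model d budget := hclen ▸ le_model hcsub hcne hcsum
    have hk1' : (1 : Int) ≤ (k : Int) := by exact_mod_cast hk1
    have hmne : model d budget ≠ 0 := by omega
    have hleK : model d budget ≤ (k : Int) := by
      obtain ⟨c', hsub', hne', hsum', hlen'⟩ := model_attain hmne
      have h1 : 1 ≤ c'.length := List.length_pos_iff.mpr hne'
      have hjk : c'.length ≤ k := by
        by_contra hjk
        exact hmax c'.length (by omega) hsub'.length_le ⟨c', hsub', rfl, hsum'⟩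
      rw [← hlen']
      exact_mod_cast hjk
    have hcb : best.contains budget = true := by
      rw [PySem.Dict.contains_eq_isSome_get?, hget, if_neg hmne]; rfl
    rw [hcb, if_pos rfl, hgetD]
    omega
  | none =>
    simp only []
    have hm0 : model d budget = 0 := by
      by_contra h0
      obtain ⟨c, hsub, hne, hsum, hlen⟩ := model_attain h0
      exact exactK_none hk c.length (List.length_pos_iff.mpr hne) hsub.length_le ⟨c, hsub, rfl, hsum⟩
    obtain ⟨c0, hc0sub, hc0ne, hc0le⟩ := Pre_exists hpre
    have h1c0 : 1 ≤ c0.length := List.length_pos_iff.mpr hc0ne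
    have hc0model := le_model hc0sub hc0ne rfl
    have h1c0' : (1 : Int) ≤ (c0.length : Int) := by exact_mod_cast h1c0
    have hc0lt : c0.sum < budget := by
      rcases lt_or_eq_of_le hc0le with h | h
      · exact h
      · exfalso
        have := le_model hc0sub hc0ne h
        omega
    have hcb : best.contains budget = false := by
      rw [PySem.Dict.contains_eq_isSome_get?, hget, if_pos hm0]; rfl
    rw [hcb, if_neg Bool.false_ne_true]
    have hmemf : ∀ s, s ∈ best.keys.filter (fun s => decide (s < budget)) ↔ (model d s ≠ 0 ∧ s < budget) := by
      intro s
      rw [List.mem_filter]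
      simp [hkeys]
    have hne_f : c0.sum ∈ best.keys.filter (fun s => decide (s < budget)) := by
      rw [hmemf]
      exact ⟨by omega, hc0lt⟩
    cases hm : PySem.List.max? (best.keys.filter (fun s => decide (s < budget))) (fun s => s) with
    | none =>
      exfalso
      rw [PySem.List.max?_eq_none_iff] at hm
      rw [hm] at hne_f
      simp at hne_f
    | some m =>
      obtain ⟨hm0', hmlt⟩ := (hmemf m).mp (PySem.List.max?_mem hm)
      have hmmax : ∀ y, model d y ≠ 0 → y < budget → y ≤ m := by
        intro y hy hylt
        exact PySem.List.max?_isMax hm y ((hmemf y).mpr ⟨hy, hylt⟩)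
      obtain ⟨c1, hc1sub, hc1ne, hc1sum, hc1len⟩ := model_attain hm0'
      have h1c1 : 1 ≤ c1.length := List.length_pos_iff.mpr hc1ne
      have hinb : ((c1.length : Int), c1.sum) ∈ blocks d budget d.length :=
        mem_blocks.mpr ⟨c1, hc1sub, h1c1, hc1sub.length_le, by rw [hc1sum]; exact hmlt, rfl⟩
      rw [List.nil_append]
      cases hp : PySem.List.max? (blocks d budget d.length) (fun x => x.2) with
      | none =>
        exfalso
        rw [PySem.List.max?_eq_none_iff] at hp
        rw [hp] at hinb
        simp at hinb
      | some p =>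
        obtain ⟨c2, hc2sub, h1c2, hc2len, hc2lt, hpe⟩ := mem_blocks.mp (PySem.List.max?_mem hp)
        have hc2ne : c2 ≠ [] := by
          intro h; rw [h] at h1c2; simp at h1c2
        have hp2 : p.2 = c2.sum := by rw [hpe]
        have hp1 : p.1 = (c2.length : Int) := by rw [hpe]
        have hc2model := le_model hc2sub hc2ne rfl
        have h1c2' : (1 : Int) ≤ (c2.length : Int) := by exact_mod_cast h1c2
        have hp2ne : model d p.2 ≠ 0 := by rw [hp2]; omega
        have hp2lt : p.2 < budget := by rw [hp2]; exact hc2lt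
        have hp2m : p.2 ≤ m := hmmax p.2 hp2ne hp2lt
        have hmp2 : m ≤ p.2 := by
          have h := PySem.List.max?_isMax hp _ hinb
          simp only at h
          rw [hc1sum] at h
          exact h
        have hpm : p.2 = m := le_antisymm hp2m hmp2
        have hup : p.1 ≤ model d m := by
          rw [hp1, ← hpm, hp2]
          exact hc2model
        have hdown : model d m ≤ p.1 := by
          have h := max?_blocks_ties hp _ hinb (by simp only; rw [hc1sum, hpm])
          simp only at h
          rw [hc1len] at h
          exact h
        simp only [Option.map_some, Option.getD_some]
        rw [hgetD]
        exact le_antisymm hup hdown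

-- ===== VERDICT (by name: the statement is the Claim_ definition above) =====
theorem solution_spec : Claim_equal_solution := by
  intro d budget _ hpre
  unfold Spec_solution
  exact solution_eq d budget hpre
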